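-- pv_equiv track=rewrite | github.com/theFinalSumOfParentsMistakes/arcStyleDetectorOnline | interface/myCode.py | compare_halves
-- ===== SOURCE A (Python) =====
-- def compare_halves(arr, current_depth, max_depth):
--     n = len(arr)
--     if n == 1:
--         return [0]
--     elif n == 2:
--         if arr[0] > arr[1]:
--             return [1]
--         else:
--             return [0]
--     elif current_depth > max_depth:
--         return []
--     else:
--         center = n // 2
--         left_sum = sum(arr[:center])
--         right_sum = sum(arr[center:])
--         if left_sum > right_sum:
--             return compare_halves(arr[:center],current_depth+1, max_depth) + [1] + compare_halves(arr[center:],current_depth+1, max_depth)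
--         else:
--             return compare_halves(arr[:center],current_depth+1, max_depth) + [0] + compare_halves(arr[center:],current_depth+1, max_depth)
-- ===== SOURCE B (Python) =====
-- def compare_halves(arr, current_depth, max_depth):
--     # prefix sums + index-bound recursion: O(1) half-sums, no slicing
--     prefix = [0]
--     acc = 0
--     for x in arr:
--         acc += x
--         prefix.append(acc)
--
--     def go(lo, hi, d):
--         n = hi - lo
--         if n == 1:
--             return [0]
--         if n == 2:
--             return [1] if arr[lo] > arr[lo + 1] else [0]
--         if d > max_depth:
--             return []
--         mid = lo + n // 2
--         bit = 1 if prefix[mid] - prefix[lo] > prefix[hi] - prefix[mid] else 0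
--         return go(lo, mid, d + 1) + [bit] + go(mid, hi, d + 1)
--
--     return go(0, len(arr), current_depth)
-- ===== Notes on version B (the rewrite author's own statement) =====
-- stated objective: alternative
-- what changed: B precomputes one prefix-sum array and recurses on (lo,hi) index bounds, taking each half-sum as a difference of two prefix sums instead of A's re-slicing and re-summing the array at every recursion level; it trades A's per-level O(n) slicing for a single O(n) prefix pass.
import Mathlib
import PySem

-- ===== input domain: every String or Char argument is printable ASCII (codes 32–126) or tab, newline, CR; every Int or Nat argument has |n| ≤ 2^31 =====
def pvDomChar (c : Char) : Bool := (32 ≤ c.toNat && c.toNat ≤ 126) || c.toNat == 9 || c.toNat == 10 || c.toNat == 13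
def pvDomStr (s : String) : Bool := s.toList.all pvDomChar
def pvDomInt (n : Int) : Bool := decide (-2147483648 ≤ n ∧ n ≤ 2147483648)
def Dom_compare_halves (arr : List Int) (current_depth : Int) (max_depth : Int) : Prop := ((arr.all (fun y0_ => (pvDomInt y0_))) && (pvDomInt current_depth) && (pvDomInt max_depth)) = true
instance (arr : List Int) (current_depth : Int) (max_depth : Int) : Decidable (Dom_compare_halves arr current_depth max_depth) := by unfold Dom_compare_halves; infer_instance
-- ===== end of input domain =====

-- B replaces A's per-level slicing and re-summing by one prefix-sum pass and an
-- index-bound recursion that takes each half-sum as a difference of two prefix sums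
-- (objective: alternative algorithm; equivalence is about the return value).

-- ===== PORT A =====
-- termination measures for the ports' well-founded recursions (cited in decreasing_by)
lemma gapDec (cd md : Int) (h3 : ¬ cd > md) :
    (md - (cd + 1) + 1).toNat < (md - cd + 1).toNat := by
  have hd : cd ≤ md := not_lt.mp h3
  have e1 : md - (cd + 1) + 1 = md - cd := by ring
  rw [e1]
  have hb : (0 : Int) < md - cd + 1 :=
    lt_of_le_of_lt (sub_nonneg.mpr hd) (lt_add_one _)
  exact (Int.toNat_lt_toNat hb).mpr (lt_add_one _)

lemma decCore_left (n : Nat) (cd md : Int) (h1 : ¬ n = 1) (h2 : ¬ n = 2) (h3 : ¬ cd > md) :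
    (if n / 2 = 0 then (md - (cd + 1) + 1).toNat else n / 2) <
    (if n = 0 then (md - cd + 1).toNat else n) := by
  rcases Nat.eq_zero_or_pos n with h0 | h0
  · subst h0; simpa using gapDec cd md h3
  · have h1' : 1 < n := lt_of_le_of_ne h0 (fun e => h1 e.symm)
    have hpos : 0 < n / 2 := Nat.div_pos h1' two_pos
    rw [if_neg (Nat.pos_iff_ne_zero.mp hpos), if_neg (Nat.pos_iff_ne_zero.mp h0)]
    exact Nat.div_lt_self h0 one_lt_two

lemma decCore_right (n : Nat) (cd md : Int) (h1 : ¬ n = 1) (h2 : ¬ n = 2) (h3 : ¬ cd > md) :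
    (if n - n / 2 = 0 then (md - (cd + 1) + 1).toNat else n - n / 2) <
    (if n = 0 then (md - cd + 1).toNat else n) := by
  rcases Nat.eq_zero_or_pos n with h0 | h0
  · subst h0; simpa using gapDec cd md h3
  · have h1' : 1 < n := lt_of_le_of_ne h0 (fun e => h1 e.symm)
    have hpos : 0 < n - n / 2 := Nat.sub_pos_of_lt (Nat.div_lt_self h0 one_lt_two)
    rw [if_neg (Nat.pos_iff_ne_zero.mp hpos), if_neg (Nat.pos_iff_ne_zero.mp h0)]
    exact Nat.sub_lt h0 (Nat.div_pos h1' two_pos)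

lemma decA_left (L : Nat) (cd md : Int) (h1 : ¬ L = 1) (h2 : ¬ L = 2) (h3 : ¬ cd > md) :
    (if min (L / 2) L = 0 then (md - (cd + 1) + 1).toNat else min (L / 2) L) <
    (if L = 0 then (md - cd + 1).toNat else L) := by
  rw [Nat.min_eq_left (Nat.div_le_self _ _)]
  exact decCore_left L cd md h1 h2 h3

lemma decA_right (L : Nat) (cd md : Int) (h1 : ¬ L = 1) (h2 : ¬ L = 2) (h3 : ¬ cd > md) :
    (if L - L / 2 = 0 then (md - (cd + 1) + 1).toNat else L - L / 2) <
    (if L = 0 then (md - cd + 1).toNat else L) :=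
  decCore_right L cd md h1 h2 h3

lemma decB_left (lo hi : Nat) (md d : Int) (h1 : ¬ hi - lo = 1) (h2 : ¬ hi - lo = 2) (h3 : ¬ d > md) :
    (if lo + (hi - lo) / 2 - lo = 0 then (md - (d + 1) + 1).toNat else lo + (hi - lo) / 2 - lo) <
    (if hi - lo = 0 then (md - d + 1).toNat else hi - lo) := by
  simp only [Nat.add_sub_cancel_left]
  exact decCore_left (hi - lo) d md h1 h2 h3

lemma decB_right (lo hi : Nat) (md d : Int) (h1 : ¬ hi - lo = 1) (h2 : ¬ hi - lo = 2) (h3 : ¬ d > md) :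
    (if hi - (lo + (hi - lo) / 2) = 0 then (md - (d + 1) + 1).toNat else hi - (lo + (hi - lo) / 2)) <
    (if hi - lo = 0 then (md - d + 1).toNat else hi - lo) := by
  simp only [← Nat.sub_sub]
  exact decCore_right (hi - lo) d md h1 h2 h3

def compare_halves (arr : List Int) (current_depth : Int) (max_depth : Int) : List Int :=
  let n := arr.length
  if _h1 : n = 1 then [0]
  else if _h2 : n = 2 then
    if PySem.List.pyGetD arr 0 0 > PySem.List.pyGetD arr 1 0 then [1] else [0]
  else if _h3 : current_depth > max_depth then []
  else
    let center := n / 2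
    let left_sum := (PySem.List.slice arr none (some (center : Int))).sum
    let right_sum := (PySem.List.slice arr (some (center : Int)) none).sum
    if left_sum > right_sum then
      compare_halves (PySem.List.slice arr none (some (center : Int))) (current_depth + 1) max_depth
        ++ [1] ++ compare_halves (PySem.List.slice arr (some (center : Int)) none) (current_depth + 1) max_depth
    else
      compare_halves (PySem.List.slice arr none (some (center : Int))) (current_depth + 1) max_depth
        ++ [0] ++ compare_halves (PySem.List.slice arr (some (center : Int)) none) (current_depth + 1) max_depth
termination_by (if arr.length = 0 then (max_depth - current_depth + 1).toNat else arr.length)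
decreasing_by
  all_goals
    simp only [PySem.List.slice_to_natCast, PySem.List.slice_from_natCast,
      List.length_take, List.length_drop]
    first
      | exact decA_left arr.length current_depth max_depth _h1 _h2 _h3
      | exact decA_right arr.length current_depth max_depth _h1 _h2 _h3

-- ===== PORT B =====
-- inner function go(lo, hi, d) of Source B (arr, prefix, max_depth are its closure)
def altGo (arr pfx : List Int) (md : Int) (lo hi : Nat) (d : Int) : List Int :=
  let n := hi - lo
  if _h1 : n = 1 then [0]
  else if _h2 : n = 2 then
    if PySem.List.pyGetD arr (lo : Int) 0 > PySem.List.pyGetD arr ((lo : Nat) + 1 : Nat) 0 then [1] else [0]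
  else if _h3 : d > md then []
  else
    let mid := lo + n / 2
    let bit : Int :=
      if PySem.List.pyGetD pfx (mid : Int) 0 - PySem.List.pyGetD pfx (lo : Int) 0 >
         PySem.List.pyGetD pfx (hi : Int) 0 - PySem.List.pyGetD pfx (mid : Int) 0 then 1 else 0
    altGo arr pfx md lo mid (d + 1) ++ [bit] ++ altGo arr pfx md mid hi (d + 1)
termination_by (if hi - lo = 0 then (md - d + 1).toNat else hi - lo)
decreasing_by
  all_goals
    first
      | exact decB_left lo hi md d _h1 _h2 _h3
      | exact decB_right lo hi md d _h1 _h2 _h3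

def compare_halves_alt (arr : List Int) (current_depth : Int) (max_depth : Int) : List Int :=
  -- prefix = [0]; acc = 0; for x in arr: acc += x; prefix.append(acc)
  let pa := arr.foldl (fun (s : List Int × Int) x => (s.1 ++ [s.2 + x], s.2 + x)) ([0], 0)
  altGo arr pa.1 max_depth 0 arr.length current_depth

-- ===== PRECONDITION & SPEC =====
def Spec_compare_halves (arr : List Int) (current_depth : Int) (max_depth : Int) (out : List Int) : Prop := out = compare_halves_alt arr current_depth max_depth
instance (arr : List Int) (current_depth : Int) (max_depth : Int) (out : List Int) : Decidable (Spec_compare_halves arr current_depth max_depth out) := by unfold Spec_compare_halves; infer_instance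

-- ===== CLAIM (what is proved, stated in full; the proofs are below) =====
def Claim_equal_compare_halves : Prop := ∀ (arr : List Int) (current_depth : Int) (max_depth : Int), Dom_compare_halves arr current_depth max_depth → Spec_compare_halves arr current_depth max_depth (compare_halves arr current_depth max_depth)

-- ===== LEMMAS AND PROOFS =====

-- running partial sums of xs starting from acc
def partials (xs : List Int) (acc : Int) : List Int :=
  match xs with
  | [] => []
  | x :: t => (acc + x) :: partials t (acc + x)

lemma foldl_prefix_eq (xs : List Int) : ∀ (pre : List Int) (acc : Int),
    (xs.foldl (fun (s : List Int × Int) x => (s.1 ++ [s.2 + x], s.2 + x)) (pre, acc)).1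
      = pre ++ partials xs acc := by
  induction xs with
  | nil => intro pre acc; simp [partials]
  | cons x t ih =>
      intro pre acc
      simp only [List.foldl_cons, partials]
      rw [ih]
      simp

lemma partials_getD (xs : List Int) : ∀ (i : Nat) (acc : Int), i < xs.length →
    (partials xs acc).getD i 0 = acc + (xs.take (i + 1)).sum := by
  induction xs with
  | nil => intro i acc h; simp at h
  | cons x t ih =>
      intro i acc h
      cases i with
      | zero => simp [partials]
      | succ j =>
          simp only [partials, List.getD_cons_succ, List.take_succ_cons, List.sum_cons]
          rw [ih j (acc + x) (by simpa using h)]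
          ring

def mkPrefix (arr : List Int) : List Int :=
  (arr.foldl (fun (s : List Int × Int) x => (s.1 ++ [s.2 + x], s.2 + x)) ([0], 0)).1

lemma mkPrefix_getD (arr : List Int) (i : Nat) (h : i ≤ arr.length) :
    PySem.List.pyGetD (mkPrefix arr) (i : Int) 0 = (arr.take i).sum := by
  rw [PySem.List.pyGetD_natCast]
  unfold mkPrefix
  rw [foldl_prefix_eq]
  cases i with
  | zero => simp
  | succ j =>
      have hj : j < arr.length := by omega
      have : ([(0:Int)] ++ partials arr 0).getD (j + 1) 0 = (partials arr 0).getD j 0 := by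
        simp
      rw [this, partials_getD arr j 0 hj]
      ring

lemma seg_sum (arr : List Int) (a b : Nat) (hab : a ≤ b) (_hb : b ≤ arr.length) :
    (arr.take b).sum - (arr.take a).sum = ((arr.drop a).take (b - a)).sum := by
  have h : arr.take b = arr.take a ++ (arr.drop a).take (b - a) := by
    rw [← List.take_add]
    congr 1
    omega
  rw [h, List.sum_append]
  ring

lemma go_eq (arr : List Int) (md : Int) : ∀ (N lo hi : Nat) (d : Int),
    (if hi - lo = 0 then (md - d + 1).toNat else hi - lo) ≤ N → lo ≤ hi → hi ≤ arr.length →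
    altGo arr (mkPrefix arr) md lo hi d
      = compare_halves ((arr.drop lo).take (hi - lo)) d md := by
  intro N
  induction N with
  | zero =>
      intro lo hi d hN hlh hha
      have h0 : hi - lo = 0 ∧ md < d := by
        by_cases h : hi - lo = 0 <;> simp [h] at hN <;> omega
      rw [altGo, compare_halves]
      simp [h0.1, h0.2]
  | succ N ih =>
      intro lo hi d hN hlh hha
      have hseg : ((arr.drop lo).take (hi - lo)).length = hi - lo := by
        simp; omega
      rw [altGo, compare_halves]
      simp only [hseg]
      by_cases h1 : hi - lo = 1
      · simp [h1]
      by_cases h2 : hi - lo = 2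
      · have hlo : lo < arr.length := by omega
        have hlo1 : lo + 1 < arr.length := by omega
        have e0 : PySem.List.pyGetD arr (lo : Int) 0 = PySem.List.pyGetD ((arr.drop lo).take (hi - lo)) 0 0 := by
          rw [PySem.List.pyGetD_natCast, PySem.List.pyGetD_zero]
          simp [List.getD, h2, hlo]
        have e1 : PySem.List.pyGetD arr ((lo : Int) + 1) 0 = PySem.List.pyGetD ((arr.drop lo).take (hi - lo)) 1 0 := by
          rw [show ((lo : Int) + 1) = ((lo + 1 : Nat) : Int) by push_cast; ring, PySem.List.pyGetD_natCast]
          rw [show ((1:Int)) = ((1:Nat):Int) by norm_num, PySem.List.pyGetD_natCast]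
          simp [List.getD, h2, hlo1]
        simp [h2, e0, e1]
      by_cases h3 : d > md
      · simp [h1, h2, h3]
      · -- recursive case
        simp only [h1, h2, h3, dite_eq_ite, if_false]
        have hn0 : hi - lo = 0 ∨ 3 ≤ hi - lo := by omega
        set n := hi - lo with hn
        set c := n / 2 with hc
        set mid := lo + c with hmid
        have hmid_le : mid ≤ hi := by omega
        have hmid_len : mid ≤ arr.length := by omega
        -- the sums agree
        have hsL : PySem.List.pyGetD (mkPrefix arr) (mid : Int) 0 - PySem.List.pyGetD (mkPrefix arr) (lo : Int) 0
            = ((arr.drop lo).take (mid - lo)).sum := by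
          rw [mkPrefix_getD arr mid hmid_len, mkPrefix_getD arr lo (by omega)]
          exact seg_sum arr lo mid (by omega) hmid_len
        have hsR : PySem.List.pyGetD (mkPrefix arr) (hi : Int) 0 - PySem.List.pyGetD (mkPrefix arr) (mid : Int) 0
            = ((arr.drop mid).take (hi - mid)).sum := by
          rw [mkPrefix_getD arr hi hha, mkPrefix_getD arr mid hmid_len]
          exact seg_sum arr mid hi hmid_le hha
        -- the slices agree
        have hL : PySem.List.slice ((arr.drop lo).take n) none (some (c : Int))
            = (arr.drop lo).take (mid - lo) := by
          rw [PySem.List.slice_to_natCast, List.take_take]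
          congr 1
          omega
        have hR : PySem.List.slice ((arr.drop lo).take n) (some (c : Int)) none
            = (arr.drop mid).take (hi - mid) := by
          rw [PySem.List.slice_from_natCast, List.drop_take, List.drop_drop]
          congr 1 <;> omega
        -- measures for the recursive calls
        have hm1 : (if mid - lo = 0 then (md - (d + 1) + 1).toNat else mid - lo) ≤ N := by
          split_ifs at hN ⊢ <;> omega
        have hm2 : (if hi - mid = 0 then (md - (d + 1) + 1).toNat else hi - mid) ≤ N := by
          split_ifs at hN ⊢ <;> omega
        have ih1 := ih lo mid (d + 1) hm1 (by omega) hmid_len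
        have ih2 := ih mid hi (d + 1) hm2 hmid_le hha
        rw [hL, hR, ih1, ih2, hsL, hsR]
        split_ifs <;> rfl

-- ===== VERDICT (by name: the statement is the Claim_ definition above) =====
theorem compare_halves_spec : Claim_equal_compare_halves := by
  intro arr current_depth max_depth _
  unfold Spec_compare_halves compare_halves_alt
  have h := go_eq arr max_depth
      (if arr.length - 0 = 0 then (max_depth - current_depth + 1).toNat else arr.length - 0)
      0 arr.length current_depth (le_refl _) (Nat.zero_le _) (le_refl _)
  show compare_halves arr current_depth max_depth
      = altGo arr (mkPrefix arr) max_depth 0 arr.length current_depth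
  rw [h]
  simp
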